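-- pv_equiv track=rewrite | github.com/Florent-V/Advent-Of-Code | pre_aoc_2023/Day_01/script.py | _get_num_b
-- ===== SOURCE A (Python) =====
-- def _get_sum(in_str):
--     return int(in_str[0] + in_str[-1])
--
-- def _get_num_b(in_line):
--     nums = {
--         "1": "1",
--         "2": "2",
--         "3": "3",
--         "4": "4",
--         "5": "5",
--         "6": "6",
--         "7": "7",
--         "8": "8",
--         "9": "9",
--         "one": "1",
--         "two": "2",
--         "three": "3",
--         "four": "4",
--         "five": "5",
--         "six": "6",
--         "seven": "7",
--         "eight": "8",
--         "nine": "9",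
--     }
--     res = ""
--     for cur_pos in range(len(in_line)):
--         for _k, _v in nums.items():
--             if in_line[cur_pos:].startswith(_k):
--                 res += nums[_v]
--                 break
--     return _get_sum(res)
-- ===== SOURCE B (Python) =====
-- _WORDS = {
--     "one": "1", "two": "2", "three": "3", "four": "4", "five": "5",
--     "six": "6", "seven": "7", "eight": "8", "nine": "9",
-- }
--
--
-- def _digit_at(s, i):
--     c = s[i]
--     if c in "123456789":
--         return c
--     for w, d in _WORDS.items():
--         if s.startswith(w, i):
--             return d
--     return None
--
--
-- def _get_num_b(in_line):
--     i = 0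
--     while _digit_at(in_line, i) is None:
--         i += 1
--     j = len(in_line) - 1
--     while _digit_at(in_line, j) is None:
--         j -= 1
--     return 10 * int(_digit_at(in_line, i)) + int(_digit_at(in_line, j))
-- ===== Notes on version B (the rewrite author's own statement) =====
-- stated objective: faster
-- what changed: A scans every position, copies the suffix in_line[cur_pos:] at each one, tries all 18 dict keys, accumulates every matched digit into a string and then keeps only its first and last character; B instead runs two early-exit scans - forward until the first digit token, backward until the last - with a copy-free startswith(w, i) check at each position and no intermediate string.
import Mathlib
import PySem

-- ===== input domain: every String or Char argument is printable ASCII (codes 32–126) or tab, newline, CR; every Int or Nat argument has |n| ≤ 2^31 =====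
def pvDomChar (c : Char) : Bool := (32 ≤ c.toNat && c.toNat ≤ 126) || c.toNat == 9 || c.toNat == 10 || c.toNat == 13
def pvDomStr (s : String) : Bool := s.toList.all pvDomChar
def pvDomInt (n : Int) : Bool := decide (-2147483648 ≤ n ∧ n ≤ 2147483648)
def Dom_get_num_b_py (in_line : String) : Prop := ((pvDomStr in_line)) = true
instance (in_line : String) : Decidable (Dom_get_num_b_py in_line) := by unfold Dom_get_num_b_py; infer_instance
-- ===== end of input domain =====

-- B replaces A's full left-to-right scan (which builds the string of ALL matched digits,
-- slicing the suffix at every position, then keeps only its first and last character) by two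
-- early-exit scans — forward for the first digit token, backward for the last — with no
-- intermediate string and no suffix copies.

-- ===== PORT A =====
-- the dict literal `nums` (insertion order)
def pvNums : PySem.Dict String String :=
  PySem.Dict.ofList
  [("1", "1"), ("2", "2"), ("3", "3"), ("4", "4"), ("5", "5"), ("6", "6"), ("7", "7"),
   ("8", "8"), ("9", "9"), ("one", "1"), ("two", "2"), ("three", "3"), ("four", "4"),
   ("five", "5"), ("six", "6"), ("seven", "7"), ("eight", "8"), ("nine", "9")]

-- the inner `for _k, _v in nums.items(): if in_line[cur_pos:].startswith(_k): res += nums[_v]; break`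
-- (`nums[_v]` via getD: every value of nums is also a key, so the KeyError default is unreachable)
def pvInnerA (suffix : List Char) : List (String × String) → List Char → List Char
  | [], res => res
  | (k, v) :: rest, res =>
    if PySem.Chars.startswith suffix k.toList then
      res ++ (PySem.Dict.getD pvNums v "").toList
    else pvInnerA suffix rest res

-- _get_sum: int(in_str[0] + in_str[-1]); pyGet?/ofChars? = none is exactly where Python raises
-- (IndexError on empty res), excluded by Pre_, so the 0 defaults are unreachable under Pre_
def pvGetSum (res : List Char) : Int :=
  match PySem.List.pyGet? res 0, PySem.List.pyGet? res (-1) with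
  | some a, some b => (PySem.Int.ofChars? [a, b]).getD 0
  | _, _ => 0

def get_num_b_py (in_line : String) : Int :=
  let s := in_line.toList
  -- `in_line[cur_pos:]` with 0 ≤ cur_pos ≤ len is exactly List.drop
  let res := (List.range s.length).foldl (fun res i => pvInnerA (s.drop i) pvNums.items res) []
  pvGetSum res

-- ===== PORT B =====
def pvDigits : List Char := ['1', '2', '3', '4', '5', '6', '7', '8', '9']

-- the dict _WORDS (values are the 1-character digit strings, held as Char)
def pvWordsB : List (String × Char) :=
  [("one", '1'), ("two", '2'), ("three", '3'), ("four", '4'), ("five", '5'),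
   ("six", '6'), ("seven", '7'), ("eight", '8'), ("nine", '9')]

-- _digit_at(s, i): s[i]? = none is Python's IndexError (only reachable outside Pre_);
-- `c in "123456789"` on the 1-char c is list membership; s.startswith(w, i) on 0 ≤ i is drop+startswith
def pvDigitAt (s : List Char) (i : Nat) : Option Char :=
  match s[i]? with
  | none => none
  | some c =>
    if pvDigits.contains c then some c
    else pvWordsB.findSome? fun kv =>
      if PySem.Chars.startswith (s.drop i) kv.1.toList then some kv.2 else none

-- the `while _digit_at(in_line, i) is None: i += 1` loop (none = the loop would run past the
-- end and Python would raise IndexError; outside Pre_)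
def pvFindFwd (s : List Char) (i : Nat) : Option Nat :=
  if h : i < s.length then
    if (pvDigitAt s i).isSome then some i else pvFindFwd s (i + 1)
  else none
termination_by s.length - i

-- the `while _digit_at(in_line, j) is None: j -= 1` loop, started at len-1
def pvFindBwd (s : List Char) : Nat → Option Nat
  | 0 => if (pvDigitAt s 0).isSome then some 0 else none
  | j + 1 => if (pvDigitAt s (j + 1)).isSome then some (j + 1) else pvFindBwd s j

-- int(d) for the 1-character digit string d
def pvDigitVal (c : Char) : Int := (PySem.Int.ofChars? [c]).getD 0

def get_num_b_py_alt (in_line : String) : Int :=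
  let s := in_line.toList
  match pvFindFwd s 0 with
  | none => 0        -- Python: IndexError, outside Pre_
  | some i =>
    match (match s.length with | 0 => none | m + 1 => pvFindBwd s m) with
    | none => 0      -- unreachable once the forward scan succeeded
    | some j =>
      10 * pvDigitVal ((pvDigitAt s i).getD '0') + pvDigitVal ((pvDigitAt s j).getD '0')

-- ===== PRECONDITION & SPEC =====
-- Pre_ excludes exactly the lines containing no digit 1-9 and no spelled digit word: there A's
-- res is empty and `int(in_str[0] + ...)` raises IndexError (B's scan also raises IndexError).
def pvTokens : List String :=
  ["1", "2", "3", "4", "5", "6", "7", "8", "9", "one", "two", "three", "four", "five",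
   "six", "seven", "eight", "nine"]

def Pre_get_num_b_py (in_line : String) : Prop :=
  pvTokens.any (fun t => PySem.Str.isIn t in_line) = true

instance (in_line : String) : Decidable (Pre_get_num_b_py in_line) := by
  unfold Pre_get_num_b_py; infer_instance

def pvWitness_get_num_b_py : String := "xtwone3four"

def Spec_get_num_b_py (in_line : String) (out : Int) : Prop := out = get_num_b_py_alt in_line
instance (in_line : String) (out : Int) : Decidable (Spec_get_num_b_py in_line out) := by
  unfold Spec_get_num_b_py; infer_instance

-- ===== CLAIM (what is proved, stated in full; the proofs are below) =====
def Claim_equal_get_num_b_py : Prop := ∀ (in_line : String), Dom_get_num_b_py in_line → Pre_get_num_b_py in_line → Spec_get_num_b_py in_line (get_num_b_py in_line)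

-- ===== LEMMAS AND PROOFS =====

-- proof-only literal spellings of the two dicts' item lists
def pvNumsL : List (String × String) :=
  [("1", "1"), ("2", "2"), ("3", "3"), ("4", "4"), ("5", "5"), ("6", "6"), ("7", "7"),
   ("8", "8"), ("9", "9"), ("one", "1"), ("two", "2"), ("three", "3"), ("four", "4"),
   ("five", "5"), ("six", "6"), ("seven", "7"), ("eight", "8"), ("nine", "9")]

def pvWordsL : List (String × String) :=
  [("one", "1"), ("two", "2"), ("three", "3"), ("four", "4"), ("five", "5"),
   ("six", "6"), ("seven", "7"), ("eight", "8"), ("nine", "9")]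

-- A's word section of the dict scan is B's word findSome?
set_option maxHeartbeats 2000000 in
theorem pvWordPart (suffix res : List Char) :
    pvInnerA suffix pvWordsL res
      = res ++ (pvWordsB.findSome? fun kv =>
          if PySem.Chars.startswith suffix kv.1.toList then some kv.2 else none).toList := by
  have g1 : (PySem.Dict.getD pvNums "1" "").toList = ['1'] := by decide
  have g2 : (PySem.Dict.getD pvNums "2" "").toList = ['2'] := by decide
  have g3 : (PySem.Dict.getD pvNums "3" "").toList = ['3'] := by decide
  have g4 : (PySem.Dict.getD pvNums "4" "").toList = ['4'] := by decide
  have g5 : (PySem.Dict.getD pvNums "5" "").toList = ['5'] := by decide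
  have g6 : (PySem.Dict.getD pvNums "6" "").toList = ['6'] := by decide
  have g7 : (PySem.Dict.getD pvNums "7" "").toList = ['7'] := by decide
  have g8 : (PySem.Dict.getD pvNums "8" "").toList = ['8'] := by decide
  have g9 : (PySem.Dict.getD pvNums "9" "").toList = ['9'] := by decide
  simp only [pvWordsL, pvWordsB, pvInnerA, List.findSome?_cons, g1,g2,g3,g4,g5,g6,g7,g8,g9]
  split_ifs <;> simp

-- at each in-range position A's inner dict scan appends exactly B's _digit_at match
set_option maxHeartbeats 2000000 in
theorem pvInner_core (c : Char) (t res : List Char) :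
    pvInnerA (c :: t) pvNumsL res
      = res ++ (if pvDigits.contains c then some c
          else pvWordsB.findSome? fun kv =>
            if PySem.Chars.startswith (c :: t) kv.1.toList then some kv.2 else none).toList := by
  by_cases hd : c ∈ pvDigits
  · simp only [pvDigits, List.mem_cons, List.not_mem_nil, or_false] at hd
    rcases hd with hd|hd|hd|hd|hd|hd|hd|hd|hd <;> subst hd <;>
      simp [pvInnerA, pvNumsL, pvDigits, PySem.Chars.startswith, List.isPrefixOf] <;> decide
  · have hcon : pvDigits.contains c = false := by
      simpa [pvDigits, List.contains_eq_mem] using hd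
    simp only [pvDigits, List.mem_cons, List.not_mem_nil, or_false] at hd
    push Not at hd
    obtain ⟨h1,h2,h3,h4,h5,h6,h7,h8,h9⟩ := hd
    have f1 : PySem.Chars.startswith (c :: t) "1".toList = false := by
      simp [PySem.Chars.startswith, List.isPrefixOf]; exact fun hh => h1 (Eq.symm hh)
    have f2 : PySem.Chars.startswith (c :: t) "2".toList = false := by
      simp [PySem.Chars.startswith, List.isPrefixOf]; exact fun hh => h2 (Eq.symm hh)
    have f3 : PySem.Chars.startswith (c :: t) "3".toList = false := by
      simp [PySem.Chars.startswith, List.isPrefixOf]; exact fun hh => h3 (Eq.symm hh)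
    have f4 : PySem.Chars.startswith (c :: t) "4".toList = false := by
      simp [PySem.Chars.startswith, List.isPrefixOf]; exact fun hh => h4 (Eq.symm hh)
    have f5 : PySem.Chars.startswith (c :: t) "5".toList = false := by
      simp [PySem.Chars.startswith, List.isPrefixOf]; exact fun hh => h5 (Eq.symm hh)
    have f6 : PySem.Chars.startswith (c :: t) "6".toList = false := by
      simp [PySem.Chars.startswith, List.isPrefixOf]; exact fun hh => h6 (Eq.symm hh)
    have f7 : PySem.Chars.startswith (c :: t) "7".toList = false := by
      simp [PySem.Chars.startswith, List.isPrefixOf]; exact fun hh => h7 (Eq.symm hh)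
    have f8 : PySem.Chars.startswith (c :: t) "8".toList = false := by
      simp [PySem.Chars.startswith, List.isPrefixOf]; exact fun hh => h8 (Eq.symm hh)
    have f9 : PySem.Chars.startswith (c :: t) "9".toList = false := by
      simp [PySem.Chars.startswith, List.isPrefixOf]; exact fun hh => h9 (Eq.symm hh)
    have hsplit : pvNumsL = [("1","1"),("2","2"),("3","3"),("4","4"),("5","5"),("6","6"),
      ("7","7"),("8","8"),("9","9")] ++ pvWordsL := by rfl
    rw [hsplit]
    simp only [List.cons_append, List.nil_append, pvInnerA, f1,f2,f3,f4,f5,f6,f7,f8,f9,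
      Bool.false_eq_true, if_false, hcon]
    exact pvWordPart _ _

theorem pvInner_eq (s : List Char) (i : Nat) (h : i < s.length) (res : List Char) :
    pvInnerA (s.drop i) pvNums.items res = res ++ (pvDigitAt s i).toList := by
  have hc : s[i]? = some s[i] := List.getElem?_eq_getElem h
  have hdrop : s.drop i = s[i] :: s.drop (i + 1) := List.drop_eq_getElem_cons h
  have hitems : pvNums.items = pvNumsL := rfl
  rw [hitems]
  simp only [pvDigitAt, hc, hdrop]
  exact pvInner_core _ _ _

-- every digit _digit_at can return is one of '1'..'9'
theorem pvDigitAt_mem {s : List Char} {i : Nat} {c : Char}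
    (h : pvDigitAt s i = some c) : c ∈ pvDigits := by
  cases hs : s[i]? with
  | none => exact absurd (by simpa only [pvDigitAt, hs] using h) (by simp)
  | some c' =>
    simp only [pvDigitAt, hs] at h
    by_cases hcon : pvDigits.contains c'
    · rw [if_pos hcon] at h
      cases h
      exact List.contains_iff_mem.mp hcon
    · rw [if_neg hcon] at h
      obtain ⟨kv, hkv, hf⟩ := List.exists_of_findSome?_eq_some h
      have : kv.2 = c := by
        by_cases hsw : PySem.Chars.startswith (s.drop i) kv.1.toList
        · rw [if_pos hsw] at hf; exact Option.some.inj hf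
        · rw [if_neg hsw] at hf; exact absurd hf (by simp)
      subst this
      revert hkv
      have : ∀ kv ∈ pvWordsB, kv.2 ∈ pvDigits := by decide
      exact this kv

-- the forward scan finds the head of the flattened match list
theorem pvFwd_aux (s : List Char) :
    ∀ d i, s.length - i = d →
      ((List.range' i (s.length - i)).flatMap (fun j => (pvDigitAt s j).toList)).head?
        = (pvFindFwd s i).bind (fun j => pvDigitAt s j) := by
  intro d
  induction d with
  | zero =>
    intro i h
    rw [pvFindFwd, h]
    simp [show ¬ i < s.length by omega]
  | succ d ih =>
    intro i h
    have hlt : i < s.length := by omega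
    rw [pvFindFwd, dif_pos hlt, h, List.range'_succ, List.flatMap_cons]
    cases hdi : pvDigitAt s i with
    | some c => simp [hdi]
    | none =>
      have := ih (i + 1) (by omega)
      rw [show s.length - (i + 1) = d by omega] at this
      simp [this]

-- the backward scan finds the last element of the flattened match list
theorem pvBwd_aux (s : List Char) :
    ∀ j, ((List.range (j + 1)).flatMap (fun t => (pvDigitAt s t).toList)).getLast?
        = (pvFindBwd s j).bind (fun t => pvDigitAt s t) := by
  intro j
  induction j with
  | zero =>
    cases hd0 : pvDigitAt s 0 <;> simp [pvFindBwd, hd0, List.range_succ]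
  | succ j ih =>
    rw [List.range_succ, List.flatMap_append]
    cases hdj : pvDigitAt s (j + 1) with
    | some c => simp [pvFindBwd, hdj, List.getLast?_append]
    | none => simp [pvFindBwd, hdj, ih]

-- a position whose suffix starts with a spelled word is matched by _digit_at
theorem pvWord_match (s : List Char) (i : Nat) (w : String) (c : Char)
    (hmem : (w, c) ∈ pvWordsB) (hpre : w.toList <+: s.drop i) (hlen : i < s.length) :
    (pvDigitAt s i).isSome := by
  have hc : s[i]? = some s[i] := List.getElem?_eq_getElem hlen
  simp only [pvDigitAt, hc]
  by_cases hcon : pvDigits.contains s[i]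
  · rw [if_pos hcon]; rfl
  · rw [if_neg hcon]
    rw [Option.isSome_iff_ne_none]
    intro hn
    rw [List.findSome?_eq_none_iff] at hn
    have := hn (w, c) hmem
    rw [if_pos ((PySem.Chars.startswith_iff _ _).mpr hpre)] at this
    exact absurd this (by simp)

-- a position holding a figure 1-9 is matched by _digit_at
theorem pvDigit_match (s : List Char) (i : Nat) (t : String) (c : Char)
    (ht : t.toList = [c]) (hpre : t.toList <+: s.drop i) (hmem : c ∈ pvDigits) :
    (pvDigitAt s i).isSome := by
  rw [ht] at hpre
  obtain ⟨u, hu⟩ := hpre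
  have hc : s[i]? = some c := by
    rw [← List.head?_drop, ← hu]; rfl
  simp only [pvDigitAt, hc]
  rw [if_pos (List.contains_iff_mem.mpr hmem)]
  rfl

-- a line satisfying Pre_ has a match at some position
set_option maxHeartbeats 2000000 in
theorem pvPre_match {in_line : String} (h : Pre_get_num_b_py in_line) :
    ∃ i, i < in_line.toList.length ∧ (pvDigitAt in_line.toList i).isSome := by
  unfold Pre_get_num_b_py at h
  obtain ⟨t, ht, hin⟩ := List.any_eq_true.mp h
  have hinf : t.toList <:+: in_line.toList := (PySem.Str.isIn_iff_infix _ _).mp hin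
  obtain ⟨pre, suf, hsplit⟩ := hinf
  have htne : t.toList ≠ [] := by
    fin_cases ht <;> decide
  have hdropi : in_line.toList.drop pre.length = t.toList ++ suf := by
    rw [← hsplit, List.append_assoc, List.drop_left]
  have hlen : pre.length < in_line.toList.length := by
    by_contra hge
    push Not at hge
    rw [List.drop_eq_nil_of_le hge] at hdropi
    exact htne (List.append_eq_nil_iff.mp hdropi.symm).1
  refine ⟨pre.length, hlen, ?_⟩
  have hpre : t.toList <+: in_line.toList.drop pre.length := by
    rw [hdropi]; exact List.prefix_append _ _
  fin_cases ht
  all_goals first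
  | exact pvDigit_match _ _ _ '1' (by decide) hpre (by decide)
  | exact pvDigit_match _ _ _ '2' (by decide) hpre (by decide)
  | exact pvDigit_match _ _ _ '3' (by decide) hpre (by decide)
  | exact pvDigit_match _ _ _ '4' (by decide) hpre (by decide)
  | exact pvDigit_match _ _ _ '5' (by decide) hpre (by decide)
  | exact pvDigit_match _ _ _ '6' (by decide) hpre (by decide)
  | exact pvDigit_match _ _ _ '7' (by decide) hpre (by decide)
  | exact pvDigit_match _ _ _ '8' (by decide) hpre (by decide)
  | exact pvDigit_match _ _ _ '9' (by decide) hpre (by decide)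
  | exact pvWord_match _ _ "one" '1' (by decide) hpre hlen
  | exact pvWord_match _ _ "two" '2' (by decide) hpre hlen
  | exact pvWord_match _ _ "three" '3' (by decide) hpre hlen
  | exact pvWord_match _ _ "four" '4' (by decide) hpre hlen
  | exact pvWord_match _ _ "five" '5' (by decide) hpre hlen
  | exact pvWord_match _ _ "six" '6' (by decide) hpre hlen
  | exact pvWord_match _ _ "seven" '7' (by decide) hpre hlen
  | exact pvWord_match _ _ "eight" '8' (by decide) hpre hlen
  | exact pvWord_match _ _ "nine" '9' (by decide) hpre hlen

-- int(a + b) on two digit characters is 10*int(a) + int(b)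
set_option maxHeartbeats 2000000 in
theorem pvSum_eq {a b : Char} (ha : a ∈ pvDigits) (hb : b ∈ pvDigits) :
    (PySem.Int.ofChars? [a, b]).getD 0 = 10 * pvDigitVal a + pvDigitVal b := by
  fin_cases ha <;> fin_cases hb <;> decide

-- ===== VERDICT (by name: the statement is the Claim_ definition above) =====
set_option maxHeartbeats 2000000 in
theorem get_num_b_py_spec : Claim_equal_get_num_b_py := by
  intro in_line _hdom hpre
  obtain ⟨i0, hi0, hsome0⟩ := pvPre_match hpre
  unfold Spec_get_num_b_py get_num_b_py get_num_b_py_alt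
  simp only []
  generalize hgen : in_line.toList = s at hi0 hsome0 ⊢
  obtain ⟨R, hR⟩ : ∃ R, (List.range s.length).flatMap (fun i => (pvDigitAt s i).toList) = R :=
    ⟨_, rfl⟩
  -- A's res is the flattened list of per-position matches
  have hfold : (List.range s.length).foldl
      (fun res i => pvInnerA (s.drop i) pvNums.items res) [] = R := by
    rw [PySem.List.foldl_congr_mem (List.range s.length) _
      (fun res i => res ++ (pvDigitAt s i).toList) []
      (fun acc x hx => pvInner_eq s x (List.mem_range.mp hx) acc)]
    rw [PySem.List.foldl_append_eq_flatMap]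
    simpa using hR
  obtain ⟨c0w, hc0w⟩ := Option.isSome_iff_exists.mp hsome0
  have hmemR : c0w ∈ R := by
    rw [← hR]
    exact List.mem_flatMap.mpr ⟨i0, List.mem_range.mpr hi0, by simp [hc0w]⟩
  have hne : R ≠ [] := fun hnil => by simp [hnil] at hmemR
  obtain ⟨cF, hhead⟩ : ∃ c, R.head? = some c := by
    cases hRc : R with
    | nil => exact absurd hRc hne
    | cons a l => exact ⟨a, by simp⟩
  obtain ⟨cL, hlast⟩ : ∃ c, R.getLast? = some c :=
    Option.isSome_iff_exists.mp (List.getLast?_isSome.mpr hne)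
  -- the forward scan returns the first matched digit
  have hfwd : R.head? = (pvFindFwd s 0).bind (fun j => pvDigitAt s j) := by
    have h0 := pvFwd_aux s s.length 0 (by omega)
    rw [Nat.sub_zero] at h0
    rw [← hR, List.range_eq_range']
    exact h0
  obtain ⟨iF, hiF, hdF⟩ : ∃ iF, pvFindFwd s 0 = some iF ∧ pvDigitAt s iF = some cF := by
    rw [hhead] at hfwd
    cases hf : pvFindFwd s 0 with
    | none => rw [hf] at hfwd; exact absurd hfwd.symm (by simp)
    | some iF => rw [hf] at hfwd; exact ⟨iF, rfl, hfwd.symm⟩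
  -- the backward scan returns the last matched digit
  obtain ⟨m, hm⟩ : ∃ m, s.length = m + 1 := ⟨s.length - 1, by omega⟩
  have hbwd : R.getLast? = (pvFindBwd s m).bind (fun t => pvDigitAt s t) := by
    rw [← hR, hm]; exact pvBwd_aux s m
  obtain ⟨jB, hjB, hdB⟩ : ∃ jB, pvFindBwd s m = some jB ∧ pvDigitAt s jB = some cL := by
    rw [hlast] at hbwd
    cases hb : pvFindBwd s m with
    | none => rw [hb] at hbwd; exact absurd hbwd.symm (by simp)
    | some jB => rw [hb] at hbwd; exact ⟨jB, rfl, hbwd.symm⟩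
  -- evaluate both sides
  rw [hfold]
  simp only [hiF, hm, hjB, hdF, hdB, Option.getD_some]
  unfold pvGetSum
  rw [PySem.List.pyGet?_zero, PySem.List.pyGet?_neg_one, ← List.head?_eq_getElem?, hhead, hlast]
  exact pvSum_eq (pvDigitAt_mem hdF) (pvDigitAt_mem hdB)
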